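-- pv_equiv track=rewrite | github.com/poet123/- | main.py | formatCooie
-- ===== SOURCE A (Python) =====
-- def hex_to_str(s):
--     return ''.join([chr(i) for i in [int(b, 16) for b in s.split(' ')]])
--
-- def formatCooie(s):
--     temlist = []
--     for c in s:
--         temlist.append(hex(ord(c)))
--     temlist.append('0d')
--     temlist.append('0a')
--     cookie2=''
--     for i in temlist:
--         cookie2=cookie2+''.join(hex_to_str(i))
--     return cookie2
-- ===== SOURCE B (Python) =====
-- def formatCooie(s):
--     # A's hex(ord(c)) -> int(.,16) -> chr roundtrip is the identity, and
--     # the appended '0d'/'0a' decode to '\r\n': the whole thing is one concatenation.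
--     return s + '\r\n'
-- ===== Notes on version B (the rewrite author's own statement) =====
-- stated objective: simpler
-- what changed: A's per-character hex-encode/decode roundtrip (hex(ord(c)) then int(.,16), chr) is the identity and its trailing '0d','0a' tokens decode to CRLF, so B replaces the two loops, the list and the helper with the closed form s + '\r\n'.
import Mathlib
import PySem

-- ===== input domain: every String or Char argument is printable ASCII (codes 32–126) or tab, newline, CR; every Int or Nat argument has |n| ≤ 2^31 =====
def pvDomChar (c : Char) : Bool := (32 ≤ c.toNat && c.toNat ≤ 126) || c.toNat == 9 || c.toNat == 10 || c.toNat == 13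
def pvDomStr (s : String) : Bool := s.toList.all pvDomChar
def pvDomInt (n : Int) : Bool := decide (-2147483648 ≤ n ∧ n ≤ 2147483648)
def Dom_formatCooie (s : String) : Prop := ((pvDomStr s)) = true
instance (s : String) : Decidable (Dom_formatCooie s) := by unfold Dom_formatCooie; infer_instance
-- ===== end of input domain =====

-- B replaces A's per-character hex-encode/decode roundtrip (the identity) and its
-- '0d'/'0a' tokens (CRLF) by the single concatenation s ++ "\r\n".

-- ===== PORT A =====
-- ports work on List Char (PySem.Chars) and convert at the boundary

-- one hex digit of Python's hex()
def pyHexDigit (d : Nat) : Char := Char.ofNat (if d < 10 then 48 + d else 87 + d)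
-- digit loop of hex(n) for n ≥ 0; fuel = n suffices (n/16 shrinks), structural so the kernel evaluates it
def pyHexCoreF : Nat → Nat → List Char
  | _, 0 => []
  | 0, _ => []
  | fuel+1, n => pyHexCoreF fuel (n / 16) ++ [pyHexDigit (n % 16)]
-- hex(n) for n ≥ 0 (ord(c) is never negative)
def pyHex (n : Nat) : List Char :=
  if n = 0 then ['0','x','0'] else ['0','x'] ++ pyHexCoreF n n
-- hex_to_str: split on ' ', int(b,16), chr; on A's inputs every token is a valid
-- hex literal denoting a valid code point (Python raises otherwise, never reached here)
def hexToStr (s : List Char) : List Char :=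
  (PySem.Chars.splitOn s [' ']).map (fun b => Char.ofNat ((PySem.Int.ofCharsBase? b 16).getD 0).toNat)

def formatCooie (s : String) : String :=
  -- temlist: hex(ord(c)) for each c, then '0d', '0a'
  let temlist : List (List Char) := s.toList.map (fun c => pyHex c.toNat) ++ [['0','d'], ['0','a']]
  -- cookie2 accumulation: cookie2 = cookie2 + ''.join(hex_to_str(i))  (''.join of a str is that str)
  String.ofList (temlist.foldl (fun cookie2 i => cookie2 ++ hexToStr i) [])

-- ===== PORT B =====
def formatCooie_alt (s : String) : String := s ++ "\r\n"

-- ===== PRECONDITION & SPEC =====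
def Spec_formatCooie (s : String) (out : String) : Prop := out = formatCooie_alt s
instance (s : String) (out : String) : Decidable (Spec_formatCooie s out) := by unfold Spec_formatCooie; infer_instance

-- ===== CLAIM (what is proved, stated in full; the proofs are below) =====
def Claim_equal_formatCooie : Prop := ∀ (s : String), Dom_formatCooie s → Spec_formatCooie s (formatCooie s)

-- ===== LEMMAS AND PROOFS =====

-- the roundtrip is the identity on every code below 127 (all of Dom's characters)
theorem hexToStr_pyHex : ∀ n < 127, hexToStr (pyHex n) = [Char.ofNat n] := by decide

theorem foldl_roundtrip (l : List Char) (hl : ∀ c ∈ l, pvDomChar c = true) (acc : List Char) :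
    l.foldl (fun cookie2 c => cookie2 ++ hexToStr (pyHex c.toNat)) acc = acc ++ l := by
  induction l generalizing acc with
  | nil => simp
  | cons c t ih =>
    have hc : c.toNat < 127 := by
      have := hl c (by simp)
      simp [pvDomChar] at this
      omega
    simp only [List.foldl_cons, hexToStr_pyHex c.toNat hc, Char.ofNat_toNat,
      ih (fun x hx => hl x (by simp [hx]))]
    simp

-- ===== VERDICT (by name: the statement is the Claim_ definition above) =====
theorem formatCooie_spec : Claim_equal_formatCooie := by
  intro s hs
  have hl : ∀ c ∈ s.toList, pvDomChar c = true := by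
    simpa [Dom_formatCooie, pvDomStr, List.all_eq_true] using hs
  show formatCooie s = formatCooie_alt s
  unfold formatCooie formatCooie_alt
  have h1 : (s.toList.map (fun c => pyHex c.toNat) ++ [['0','d'], ['0','a']]).foldl
      (fun cookie2 i => cookie2 ++ hexToStr i) []
      = s.toList ++ ['\r', '\n'] := by
    rw [List.foldl_append, List.foldl_map]
    rw [foldl_roundtrip s.toList hl []]
    have hd : hexToStr ['0','d'] = ['\r'] := by decide
    have ha : hexToStr ['0','a'] = ['\n'] := by decide
    simp [List.foldl, hd, ha]
  show String.ofList ((s.toList.map (fun c => pyHex c.toNat) ++ [['0','d'], ['0','a']]).foldl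
      (fun cookie2 i => cookie2 ++ hexToStr i) []) = s ++ "\r\n"
  rw [h1]
  simp
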